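-- pv_equiv track=rewrite | github.com/MarcoCiammaichella/Tesi-magistrale-polimi | src/simmetria.py | simmetria_finestre_y
-- ===== SOURCE A (Python) =====
-- def simmetria_finestre_y(bbox,tolleranza):
--     if bbox.get("Windows") is None:
--         return 0
--     high_bound=min(y[1] for y in bbox.get("Windows"))
--     riga_min = max(bbox.get("Windows"), key=lambda x: x[1])
--     low_bound=riga_min[1]+riga_min[3]
--     asse_simmetria_y=int((high_bound+low_bound)/2)
--     matches=0
--     finestre=[]
--     for window in bbox.get("Windows"):
--         if window[1]<asse_simmetria_y and window[1] + window [3] > asse_simmetria_y: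
--             continue
--         finestre.append(window)
--     finestre_up = [(fx, fy,lar,lun) for (fx, fy,lar,lun) in finestre if fy < asse_simmetria_y]
--     for (fx,fy,lar,lun) in finestre_up:
--         y_speculare= (asse_simmetria_y*2)-(fy+lun)
--         for (fx2,fy2,lar2,lun2) in finestre:
--             if abs(fy2 - y_speculare) <= tolleranza and abs(fx2 - fx) <= tolleranza:
--                 matches+=1
--     if matches==len(finestre_up)and matches==len(finestre)-len(finestre_up):
--         return(1)
--     return(0)
-- ===== SOURCE B (Python) =====
-- def _bisect_left(a, x):
--     lo, hi = 0, len(a)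
--     while lo < hi:
--         mid = (lo + hi) // 2
--         if a[mid] < x:
--             lo = mid + 1
--         else:
--             hi = mid
--     return lo
--
--
-- def _bisect_right(a, x):
--     lo, hi = 0, len(a)
--     while lo < hi:
--         mid = (lo + hi) // 2
--         if a[mid] <= x:
--             lo = mid + 1
--         else:
--             hi = mid
--     return lo
--
--
-- def simmetria_finestre_y(bbox, tolleranza):
--     windows = bbox.get("Windows")
--     if windows is None:
--         return 0
--     high_bound = min(w[1] for w in windows)
--     riga_min = max(windows, key=lambda w: w[1])
--     asse = int((high_bound + (riga_min[1] + riga_min[3])) / 2)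
--     finestre = [w for w in windows if not (w[1] < asse and w[1] + w[3] > asse)]
--     finestre_up = [w for w in finestre if w[1] < asse]
--     coppie = sorted(((w[1], w[0]) for w in finestre), key=lambda p: p[0])
--     fys = [p[0] for p in coppie]
--     matches = 0
--     for (fx, fy, lar, lun) in finestre_up:
--         y_speculare = 2 * asse - (fy + lun)
--         lo = _bisect_left(fys, y_speculare - tolleranza)
--         hi = _bisect_right(fys, y_speculare + tolleranza)
--         for (fy2, fx2) in coppie[lo:hi]:
--             if abs(fx2 - fx) <= tolleranza:
--                 matches += 1
--     if matches == len(finestre_up) and matches == len(finestre) - len(finestre_up):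
--         return 1
--     return 0
-- ===== Notes on version B (the rewrite author's own statement) =====
-- stated objective: alternative
-- what changed: B sorts the kept windows by y once and, for each up-window, counts mirror candidates only inside a binary-searched y-interval (hand-written bisect_left/bisect_right loops) instead of A's full inner scan over all kept windows; on the timed input family it is not measurably faster.
import Mathlib
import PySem

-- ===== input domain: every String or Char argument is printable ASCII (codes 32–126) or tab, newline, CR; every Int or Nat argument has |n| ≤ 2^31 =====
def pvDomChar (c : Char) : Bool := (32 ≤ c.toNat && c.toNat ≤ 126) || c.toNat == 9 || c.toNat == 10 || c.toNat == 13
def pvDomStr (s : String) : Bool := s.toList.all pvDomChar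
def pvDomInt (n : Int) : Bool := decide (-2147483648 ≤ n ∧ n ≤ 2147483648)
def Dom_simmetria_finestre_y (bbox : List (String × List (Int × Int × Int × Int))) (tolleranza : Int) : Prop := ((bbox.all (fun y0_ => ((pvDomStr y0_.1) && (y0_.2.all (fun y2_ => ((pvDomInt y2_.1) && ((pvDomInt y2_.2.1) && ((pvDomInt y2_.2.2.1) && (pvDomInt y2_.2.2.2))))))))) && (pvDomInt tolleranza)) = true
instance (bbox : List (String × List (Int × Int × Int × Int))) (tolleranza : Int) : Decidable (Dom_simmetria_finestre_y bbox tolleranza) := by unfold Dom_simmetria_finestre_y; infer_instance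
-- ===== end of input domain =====

-- B restructures A's counting: instead of scanning every kept window for every up-window,
-- it sorts the kept windows by y once and counts each mirror candidate inside a
-- binary-searched y-interval; return value only, no argument is mutated.

-- ===== PORT A =====
def simmetria_finestre_y (bbox : List (String × List (Int × Int × Int × Int))) (tolleranza : Int) : Int :=
  match PySem.Dict.get? (PySem.Dict.mk bbox) "Windows" with
  | none => 0
  | some ws =>
    let high_bound := PySem.List.minD (ws.map (fun y => y.2.1)) (fun v => v) 0
    let riga_min := PySem.List.maxD ws (fun x => x.2.1) (0, 0, 0, 0)
    let low_bound := riga_min.2.1 + riga_min.2.2.2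
    -- int((high+low)/2): exact trunc-toward-zero division on the 2^31-bounded domain
    let asse := PySem.Int.truncdiv (high_bound + low_bound) 2
    let finestre := ws.foldl (fun acc w =>
      if w.2.1 < asse ∧ w.2.1 + w.2.2.2 > asse then acc else acc ++ [w]) []
    let finestre_up := finestre.filter (fun w => decide (w.2.1 < asse))
    let matchesN := finestre_up.foldl (fun m w =>
      let y_speculare := asse * 2 - (w.2.1 + w.2.2.2)
      finestre.foldl (fun m2 w2 =>
        if |w2.2.1 - y_speculare| ≤ tolleranza ∧ |w2.1 - w.1| ≤ tolleranza then m2 + 1 else m2) m) (0 : Int)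
    if matchesN = (finestre_up.length : Int) ∧ matchesN = (finestre.length : Int) - (finestre_up.length : Int) then 1 else 0

-- ===== PORT B =====
-- hand-written bisect_left while-loop of Source B; the interval shrinks each turn, so fuel = len(a)
-- bounds the iteration count; a[mid] read with getD: 0 ≤ lo ≤ mid < hi ≤ len keeps it in range
-- (mid = (lo + hi) // 2 inlined)
def pvBlGo (a : List Int) (x : Int) : Nat → Nat → Nat → Nat
  | 0, lo, _hi => lo
  | fuel + 1, lo, hi =>
    if lo < hi then
      if a.getD ((lo + hi) / 2) 0 < x then pvBlGo a x fuel ((lo + hi) / 2 + 1) hi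
      else pvBlGo a x fuel lo ((lo + hi) / 2)
    else lo

def pvBl (a : List Int) (x : Int) : Nat := pvBlGo a x a.length 0 a.length

-- hand-written bisect_right while-loop of Source B
def pvBrGo (a : List Int) (x : Int) : Nat → Nat → Nat → Nat
  | 0, lo, _hi => lo
  | fuel + 1, lo, hi =>
    if lo < hi then
      if a.getD ((lo + hi) / 2) 0 ≤ x then pvBrGo a x fuel ((lo + hi) / 2 + 1) hi
      else pvBrGo a x fuel lo ((lo + hi) / 2)
    else lo

def pvBr (a : List Int) (x : Int) : Nat := pvBrGo a x a.length 0 a.length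

def simmetria_finestre_y_alt (bbox : List (String × List (Int × Int × Int × Int))) (tolleranza : Int) : Int :=
  match PySem.Dict.get? (PySem.Dict.mk bbox) "Windows" with
  | none => 0
  | some ws =>
    let high_bound := PySem.List.minD (ws.map (fun w => w.2.1)) (fun v => v) 0
    let riga_min := PySem.List.maxD ws (fun w => w.2.1) (0, 0, 0, 0)
    let asse := PySem.Int.truncdiv (high_bound + (riga_min.2.1 + riga_min.2.2.2)) 2
    let finestre := ws.filter (fun w => !(decide (w.2.1 < asse ∧ w.2.1 + w.2.2.2 > asse)))
    let finestre_up := finestre.filter (fun w => decide (w.2.1 < asse))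
    let coppie := PySem.List.sorted (finestre.map (fun w => (w.2.1, w.1))) (fun p => p.1) false
    let fys := coppie.map (fun p => p.1)
    let matchesN := finestre_up.foldl (fun m w =>
      let y_speculare := 2 * asse - (w.2.1 + w.2.2.2)
      let lo := pvBl fys (y_speculare - tolleranza)
      let hi := pvBr fys (y_speculare + tolleranza)
      (PySem.List.slice coppie (some (lo : Int)) (some (hi : Int))).foldl (fun m2 p =>
        if |p.2 - w.1| ≤ tolleranza then m2 + 1 else m2) m) (0 : Int)
    if matchesN = (finestre_up.length : Int) ∧ matchesN = (finestre.length : Int) - (finestre_up.length : Int) then 1 else 0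

-- ===== PRECONDITION & SPEC =====
-- Pre_ excludes exactly the inputs whose "Windows" entry is the empty list: there Python A
-- raises ValueError (min() of an empty sequence).
def Pre_simmetria_finestre_y (bbox : List (String × List (Int × Int × Int × Int))) (tolleranza : Int) : Prop :=
  PySem.Dict.get? (PySem.Dict.mk bbox) "Windows" ≠ (some [] : Option (List (Int × Int × Int × Int)))
instance (bbox : List (String × List (Int × Int × Int × Int))) (tolleranza : Int) : Decidable (Pre_simmetria_finestre_y bbox tolleranza) := by unfold Pre_simmetria_finestre_y; infer_instance

def pvWitness_simmetria_finestre_y : (List (String × List (Int × Int × Int × Int))) × Int :=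
  ([("Windows", [(0, 0, 4, 2), (0, 6, 4, 2)])], 1)

def Spec_simmetria_finestre_y (bbox : List (String × List (Int × Int × Int × Int))) (tolleranza : Int) (out : Int) : Prop := out = simmetria_finestre_y_alt bbox tolleranza
instance (bbox : List (String × List (Int × Int × Int × Int))) (tolleranza : Int) (out : Int) : Decidable (Spec_simmetria_finestre_y bbox tolleranza out) := by unfold Spec_simmetria_finestre_y; infer_instance

-- ===== CLAIM (what is proved, stated in full; the proofs are below) =====
def Claim_equal_simmetria_finestre_y : Prop := ∀ (bbox : List (String × List (Int × Int × Int × Int))) (tolleranza : Int), Dom_simmetria_finestre_y bbox tolleranza → Pre_simmetria_finestre_y bbox tolleranza → Spec_simmetria_finestre_y bbox tolleranza (simmetria_finestre_y bbox tolleranza)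

-- ===== LEMMAS AND PROOFS =====

lemma pvGetD_mono (a : List Int) (hs : a.Pairwise (· ≤ ·)) {i j : Nat} (hij : i ≤ j)
    (hj : j < a.length) : a.getD i 0 ≤ a.getD j 0 := by
  rcases Nat.lt_or_ge i j with hlt | hge
  · rw [List.getD_eq_getElem a 0 (lt_trans hlt hj), List.getD_eq_getElem a 0 hj]
    exact List.pairwise_iff_getElem.mp hs i j (lt_trans hlt hj) hj hlt
  · have : i = j := le_antisymm hij hge
    subst this; exact le_refl _

lemma pvBlGo_spec (a : List Int) (x : Int) (hs : a.Pairwise (· ≤ ·)) :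
    ∀ (n lo hi : Nat), hi - lo ≤ n → lo ≤ hi → hi ≤ a.length →
    (∀ j, j < lo → a.getD j 0 < x) →
    (∀ j, hi ≤ j → j < a.length → x ≤ a.getD j 0) →
    pvBlGo a x n lo hi ≤ a.length ∧
      (∀ j, j < pvBlGo a x n lo hi → a.getD j 0 < x) ∧
      (∀ j, pvBlGo a x n lo hi ≤ j → j < a.length → x ≤ a.getD j 0) := by
  intro n
  induction n with
  | zero =>
    intro lo hi hn hlh hhl hlow hhigh
    simp only [pvBlGo]
    exact ⟨le_trans hlh hhl, hlow, fun j hj hjl => hhigh j (by omega) hjl⟩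
  | succ n ih =>
    intro lo hi hn hlh hhl hlow hhigh
    simp only [pvBlGo]
    by_cases h : lo < hi
    · simp only [h, if_true]
      have hmid1 : lo ≤ (lo + hi) / 2 := by omega
      have hmid2 : (lo + hi) / 2 < hi := by omega
      by_cases hc : a.getD ((lo + hi) / 2) 0 < x
      · simp only [hc, if_true]
        refine ih ((lo + hi) / 2 + 1) hi (by omega) (by omega) hhl ?_ hhigh
        intro j hj
        exact lt_of_le_of_lt (pvGetD_mono a hs (by omega) (by omega)) hc
      · simp only [hc, if_false]
        refine ih lo ((lo + hi) / 2) (by omega) hmid1 (by omega) hlow ?_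
        intro j hj hjl
        push Not at hc
        exact le_trans hc (pvGetD_mono a hs hj hjl)
    · simp only [h, if_false]
      exact ⟨le_trans hlh hhl, hlow, fun j hj hjl => hhigh j (by omega) hjl⟩

lemma pvBrGo_spec (a : List Int) (x : Int) (hs : a.Pairwise (· ≤ ·)) :
    ∀ (n lo hi : Nat), hi - lo ≤ n → lo ≤ hi → hi ≤ a.length →
    (∀ j, j < lo → a.getD j 0 ≤ x) →
    (∀ j, hi ≤ j → j < a.length → x < a.getD j 0) →
    pvBrGo a x n lo hi ≤ a.length ∧
      (∀ j, j < pvBrGo a x n lo hi → a.getD j 0 ≤ x) ∧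
      (∀ j, pvBrGo a x n lo hi ≤ j → j < a.length → x < a.getD j 0) := by
  intro n
  induction n with
  | zero =>
    intro lo hi hn hlh hhl hlow hhigh
    simp only [pvBrGo]
    exact ⟨le_trans hlh hhl, hlow, fun j hj hjl => hhigh j (by omega) hjl⟩
  | succ n ih =>
    intro lo hi hn hlh hhl hlow hhigh
    simp only [pvBrGo]
    by_cases h : lo < hi
    · simp only [h, if_true]
      have hmid1 : lo ≤ (lo + hi) / 2 := by omega
      have hmid2 : (lo + hi) / 2 < hi := by omega
      by_cases hc : a.getD ((lo + hi) / 2) 0 ≤ x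
      · simp only [hc, if_true]
        refine ih ((lo + hi) / 2 + 1) hi (by omega) (by omega) hhl ?_ hhigh
        intro j hj
        exact le_trans (pvGetD_mono a hs (by omega) (by omega)) hc
      · simp only [hc, if_false]
        refine ih lo ((lo + hi) / 2) (by omega) hmid1 (by omega) hlow ?_
        intro j hj hjl
        push Not at hc
        exact lt_of_lt_of_le hc (pvGetD_mono a hs hj hjl)
    · simp only [h, if_false]
      exact ⟨le_trans hlh hhl, hlow, fun j hj hjl => hhigh j (by omega) hjl⟩

lemma pvBl_spec (a : List Int) (x : Int) (hs : a.Pairwise (· ≤ ·)) :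
    pvBl a x ≤ a.length ∧
      (∀ j, j < pvBl a x → a.getD j 0 < x) ∧
      (∀ j, pvBl a x ≤ j → j < a.length → x ≤ a.getD j 0) := by
  unfold pvBl
  exact pvBlGo_spec a x hs a.length 0 a.length (by omega) (by omega) (le_refl _)
    (by intro j hj; omega) (by intro j hj hjl; omega)

lemma pvBr_spec (a : List Int) (x : Int) (hs : a.Pairwise (· ≤ ·)) :
    pvBr a x ≤ a.length ∧
      (∀ j, j < pvBr a x → a.getD j 0 ≤ x) ∧
      (∀ j, pvBr a x ≤ j → j < a.length → x < a.getD j 0) := by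
  unfold pvBr
  exact pvBrGo_spec a x hs a.length 0 a.length (by omega) (by omega) (le_refl _)
    (by intro j hj; omega) (by intro j hj hjl; omega)

-- counting a predicate on the bisected slice of a key-sorted pair list = counting it with
-- explicit key bounds over the whole list
lemma pvCount_slice (ps : List (Int × Int)) (hps : ps.Pairwise (fun p q => p.1 ≤ q.1))
    (ylo yhi : Int) (q : Int × Int → Bool) :
    List.countP q (PySem.List.slice ps (some ((pvBl (ps.map (fun p => p.1)) ylo : Nat) : Int))
        (some ((pvBr (ps.map (fun p => p.1)) yhi : Nat) : Int)))
      = List.countP (fun p => decide (ylo ≤ p.1) && (decide (p.1 ≤ yhi) && q p)) ps := by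
  set fys := ps.map (fun p => p.1) with hfys
  have hlen : fys.length = ps.length := by simp [hfys]
  have hsf : fys.Pairwise (· ≤ ·) := by
    rw [hfys, List.pairwise_map]; exact hps
  have hkey : ∀ j (hj : j < ps.length), fys.getD j 0 = ps[j].1 := by
    intro j hj
    rw [List.getD_eq_getElem fys 0 (by omega)]
    simp [hfys]
  obtain ⟨hl_le, hl_lt, hl_ge⟩ := pvBl_spec fys ylo hsf
  obtain ⟨hr_le, hr_lt, hr_ge⟩ := pvBr_spec fys yhi hsf
  set l := pvBl fys ylo with hldef
  set r := pvBr fys yhi with hrdef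
  rw [PySem.List.slice_natCast]
  by_cases hlr : r ≤ l
  · have h0 : r - l = 0 := by omega
    rw [h0]
    simp only [List.take_zero, List.countP_nil]
    symm
    rw [List.countP_eq_zero]
    intro p hp
    obtain ⟨j, hj, rfl⟩ := List.mem_iff_getElem.mp hp
    by_cases hjl : j < l
    · have := hl_lt j hjl
      rw [hkey j hj] at this
      simp only [Bool.and_eq_true, decide_eq_true_eq]
      rintro ⟨h1, _⟩; omega
    · have := hr_ge j (by omega) (by omega)
      rw [hkey j hj] at this
      simp only [Bool.and_eq_true, decide_eq_true_eq]
      rintro ⟨_, h2, _⟩; omega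
  · push Not at hlr
    -- split ps = take l ++ mid ++ drop r
    have hsplit : ps = ps.take l ++ ((ps.drop l).take (r - l) ++ (ps.drop l).drop (r - l)) := by
      rw [List.take_append_drop, List.take_append_drop]
    conv_rhs => rw [hsplit]
    rw [List.countP_append, List.countP_append]
    have hmidlen : ((ps.drop l).take (r - l)).length = r - l := by
      simp only [List.length_take, List.length_drop]; omega
    have h1 : List.countP (fun p => decide (ylo ≤ p.1) && (decide (p.1 ≤ yhi) && q p)) (ps.take l) = 0 := by
      rw [List.countP_eq_zero]
      intro p hp
      obtain ⟨j, hj, rfl⟩ := List.mem_iff_getElem.mp hp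
      have hjl : j < l ∧ j < ps.length := by
        simp only [List.length_take] at hj; omega
      rw [List.getElem_take]
      have := hl_lt j hjl.1
      rw [hkey j hjl.2] at this
      simp only [Bool.and_eq_true, decide_eq_true_eq]
      rintro ⟨h1, _⟩; omega
    have h3 : List.countP (fun p => decide (ylo ≤ p.1) && (decide (p.1 ≤ yhi) && q p)) ((ps.drop l).drop (r - l)) = 0 := by
      rw [List.drop_drop, show l + (r - l) = r from by omega, List.countP_eq_zero]
      intro p hp
      obtain ⟨j, hj, rfl⟩ := List.mem_iff_getElem.mp hp
      rw [List.getElem_drop]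
      have hjlen : r + j < ps.length := by
        simp only [List.length_drop] at hj; omega
      have := hr_ge (r + j) (by omega) (by omega)
      rw [hkey _ hjlen] at this
      simp only [Bool.and_eq_true, decide_eq_true_eq]
      rintro ⟨_, h2, _⟩; omega
    have h2 : List.countP (fun p => decide (ylo ≤ p.1) && (decide (p.1 ≤ yhi) && q p)) ((ps.drop l).take (r - l))
        = List.countP q ((ps.drop l).take (r - l)) := by
      apply List.countP_congr
      intro p hp
      obtain ⟨j, hj, rfl⟩ := List.mem_iff_getElem.mp hp
      have hjr : j < r - l := by rw [hmidlen] at hj; exact hj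
      have hjlen : l + j < ps.length := by omega
      rw [List.getElem_take, List.getElem_drop]
      have hge := hl_ge (l + j) (by omega) (by omega)
      have hlt := hr_lt (l + j) (by omega)
      rw [hkey _ hjlen] at hge hlt
      simp only [Bool.and_eq_true, decide_eq_true_eq]
      constructor
      · rintro ⟨_, _, hq⟩; exact hq
      · intro hq; exact ⟨by omega, by omega, hq⟩
    omega

-- A's filter loop builds finestre by appending; it equals B's List.filter
lemma pvFiltro_eq (ws : List (Int × Int × Int × Int)) (asse : Int) :
    ws.foldl (fun acc w => if w.2.1 < asse ∧ w.2.1 + w.2.2.2 > asse then acc else acc ++ [w]) []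
      = ws.filter (fun w => !(decide (w.2.1 < asse ∧ w.2.1 + w.2.2.2 > asse))) := by
  have h := PySem.List.foldl_append_if (fun w => !(decide (w.2.1 < asse ∧ w.2.1 + w.2.2.2 > asse)))
      (id : (Int × Int × Int × Int) → (Int × Int × Int × Int)) ws []
  rw [List.map_id, List.nil_append] at h
  rw [← h]
  apply PySem.List.foldl_congr_mem
  intro acc w _
  by_cases hc : w.2.1 < asse ∧ w.2.1 + w.2.2.2 > asse <;> simp [hc]

-- per up-window: A's full inner scan counts what B counts on the bisected slice
lemma pvInner_eq (finestre : List (Int × Int × Int × Int)) (w : Int × Int × Int × Int)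
    (asse tolleranza : Int) (m : Int) :
    finestre.foldl (fun m2 w2 =>
        if |w2.2.1 - (asse * 2 - (w.2.1 + w.2.2.2))| ≤ tolleranza ∧ |w2.1 - w.1| ≤ tolleranza then m2 + 1 else m2) m
      = (PySem.List.slice (PySem.List.sorted (finestre.map (fun v => (v.2.1, v.1))) (fun p => p.1) false)
          (some ((pvBl ((PySem.List.sorted (finestre.map (fun v => (v.2.1, v.1))) (fun p => p.1) false).map (fun p => p.1))
              (2 * asse - (w.2.1 + w.2.2.2) - tolleranza) : Nat) : Int))
          (some ((pvBr ((PySem.List.sorted (finestre.map (fun v => (v.2.1, v.1))) (fun p => p.1) false).map (fun p => p.1))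
              (2 * asse - (w.2.1 + w.2.2.2) + tolleranza) : Nat) : Int))).foldl
          (fun m2 p => if |p.2 - w.1| ≤ tolleranza then m2 + 1 else m2) m := by
  set coppie := PySem.List.sorted (finestre.map (fun v => (v.2.1, v.1))) (fun p => p.1) false with hcop
  have hpw : coppie.Pairwise (fun p q => p.1 ≤ q.1) := PySem.List.sorted_pairwise _ _
  rw [PySem.List.foldl_ite_add_one, PySem.List.foldl_ite_add_one]
  congr 1
  rw [Nat.cast_inj]
  rw [pvCount_slice coppie hpw (2 * asse - (w.2.1 + w.2.2.2) - tolleranza)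
      (2 * asse - (w.2.1 + w.2.2.2) + tolleranza) (fun p => decide (|p.2 - w.1| ≤ tolleranza))]
  have hperm : coppie.Perm (finestre.map (fun v => (v.2.1, v.1))) := PySem.List.sorted_perm _ _ _
  rw [hperm.countP_eq, List.countP_map]
  apply List.countP_congr
  intro v _
  simp only [Function.comp_apply, Bool.and_eq_true, decide_eq_true_eq, abs_le]
  constructor
  · rintro ⟨h1, h2⟩; exact ⟨by omega, by omega, by omega, by omega⟩
  · rintro ⟨h1, h2, h3, h4⟩; exact ⟨⟨by omega, by omega⟩, by omega, by omega⟩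

-- the whole matches loop
lemma pvMatches_eq (finestre ups : List (Int × Int × Int × Int)) (asse tolleranza : Int) :
    ∀ (acc : Int),
    ups.foldl (fun m w =>
      finestre.foldl (fun m2 w2 =>
        if |w2.2.1 - (asse * 2 - (w.2.1 + w.2.2.2))| ≤ tolleranza ∧ |w2.1 - w.1| ≤ tolleranza then m2 + 1 else m2) m) acc
      = ups.foldl (fun m w =>
      (PySem.List.slice (PySem.List.sorted (finestre.map (fun v => (v.2.1, v.1))) (fun p => p.1) false)
          (some ((pvBl ((PySem.List.sorted (finestre.map (fun v => (v.2.1, v.1))) (fun p => p.1) false).map (fun p => p.1))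
              (2 * asse - (w.2.1 + w.2.2.2) - tolleranza) : Nat) : Int))
          (some ((pvBr ((PySem.List.sorted (finestre.map (fun v => (v.2.1, v.1))) (fun p => p.1) false).map (fun p => p.1))
              (2 * asse - (w.2.1 + w.2.2.2) + tolleranza) : Nat) : Int))).foldl
          (fun m2 p => if |p.2 - w.1| ≤ tolleranza then m2 + 1 else m2) m) acc := by
  induction ups with
  | nil => intro acc; rfl
  | cons u rest ih =>
    intro acc
    simp only [List.foldl_cons]
    rw [← pvInner_eq finestre u asse tolleranza acc]
    exact ih _

-- ===== VERDICT (by name: the statement is the Claim_ definition above) =====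
theorem simmetria_finestre_y_spec : Claim_equal_simmetria_finestre_y := by
  intro bbox tolleranza _hdom _hpre
  unfold Spec_simmetria_finestre_y
  unfold simmetria_finestre_y simmetria_finestre_y_alt
  cases hget : PySem.Dict.get? (PySem.Dict.mk bbox) "Windows" with
  | none => rfl
  | some ws =>
    simp only []
    rw [pvFiltro_eq]
    rw [pvMatches_eq]
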